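-- pv_equiv track=rewrite | github.com/S0okJu/BOJ | 0-9999/1000-1999/1400-1499/1417/1417.py | solution
-- ===== SOURCE A (Python) =====
-- from typing import List
-- from heapq import heappush, heappop, heapify
--
-- def solution(N:int, cands:List[int])->int:
--     if N == 1:
--         return 0
--
--     dasom = cands[0]
--     heap = [-1 * cand for cand in cands[1:]]
--     heapify(heap)
--
--     result= 0
--     while -heap[0] >= dasom:
--         curr = -heappop(heap)
--         result += 1
--         curr -=1
--         dasom +=1
--
--         heappush(heap,-curr)
--
--     return result
-- ===== SOURCE B (Python) =====
-- def solution(N, cands):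
--     if N == 1:
--         return 0
--     dasom = cands[0]
--     others = cands[1:]
--     k = 0
--     while sum(x - (dasom + k - 1) for x in others if x >= dasom + k) > k:
--         k += 1
--     return k
-- ===== Notes on version B (the rewrite author's own statement) =====
-- stated objective: alternative
-- what changed: B does no simulation at all: instead of A's heap loop that repeatedly pops the max opponent, decrements it and re-pushes, B searches for the smallest k such that the total surplus sum(max(0, x-(dasom+k-1))) over the unmodified opponent list is at most k, which equals the greedy step count.
import Mathlib
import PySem

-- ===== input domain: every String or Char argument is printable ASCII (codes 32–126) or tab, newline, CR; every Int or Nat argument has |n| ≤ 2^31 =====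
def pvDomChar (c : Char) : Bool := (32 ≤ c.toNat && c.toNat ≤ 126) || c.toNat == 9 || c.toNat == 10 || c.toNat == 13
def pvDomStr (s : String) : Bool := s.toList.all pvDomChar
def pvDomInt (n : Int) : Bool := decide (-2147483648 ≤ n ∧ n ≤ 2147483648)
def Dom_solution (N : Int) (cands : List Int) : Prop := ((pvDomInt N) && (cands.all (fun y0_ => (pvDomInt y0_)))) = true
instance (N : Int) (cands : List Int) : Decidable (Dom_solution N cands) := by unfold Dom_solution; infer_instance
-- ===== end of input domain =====

-- B replaces A's heap simulation (pop the max opponent, decrement, re-push, count steps) by a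
-- search, over the UNMODIFIED opponent list, for the smallest k whose total surplus
-- sum(max(0, x-(dasom+k-1))) is at most k; no mutation, no heap, no per-step max.

-- ===== PORT A =====
-- A's heapify/heappop/heappush are stdlib calls, ported by their contract: the heap is the list
-- of pending (negated) votes, heappop removes and returns its minimum, heappush inserts; this is
-- exact for A's returned count, which depends only on which value is popped, never on the heap's
-- internal layout.  The while-loop is fuel recursion; the fuel (one more than the sum of the
-- iteration potentials (-h - dasom + 1).toNat) provably exceeds the iteration count, so the
-- 'fuel = 0' branch is never the one that returns on inputs admitted by Pre_solution.
def solLoopA (fuel : Nat) (dasom result : Int) (heap : List Int) : Int :=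
  match fuel with
  | 0 => result
  | f + 1 =>
    match PySem.List.min? heap (fun y => y) with  -- -heap[0] read / heappop: the heap's minimum
    | none => result                              -- empty heap: Python raises; outside Pre_solution
    | some m =>
      if -m ≥ dasom then
        -- curr = -heappop(heap); result += 1; curr -= 1; dasom += 1; heappush(heap, -curr)
        solLoopA f (dasom + 1) (result + 1) ((-(-m - 1)) :: heap.erase m)
      else result

def solution (N : Int) (cands : List Int) : Int :=
  if N == 1 then 0
  else
    match PySem.List.pyGet? cands 0 with          -- dasom = cands[0]
    | none => 0                                   -- IndexError: outside Pre_solution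
    | some dasom =>
      let heap := (PySem.List.slice cands (some 1) none).map (fun cand => -1 * cand)
      solLoopA ((heap.map (fun h => (-h - dasom + 1).toNat)).sum + 1) dasom 0 heap

-- ===== PORT B =====
-- k = 0; while sum(x - (dasom + k - 1) for x in others if x >= dasom + k) > k: k += 1.
-- Fuel recursion for the counting loop; the fuel (one more than the surplus at k = 0) exceeds
-- the first successful k, so the 'fuel = 0' branch never answers on inputs in Pre_solution.
def solLoopB (fuel : Nat) (dasom : Int) (others : List Int) (k : Int) : Int :=
  match fuel with
  | 0 => k
  | f + 1 =>
    if ((others.filter (fun x => dasom + k ≤ x)).map (fun x => x - (dasom + k - 1))).sum > k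
    then solLoopB f dasom others (k + 1)
    else k

def solution_alt (N : Int) (cands : List Int) : Int :=
  if N == 1 then 0
  else
    match PySem.List.pyGet? cands 0 with          -- dasom = cands[0]
    | none => 0                                   -- IndexError: outside Pre_solution
    | some dasom =>
      let others := PySem.List.slice cands (some 1) none
      solLoopB ((others.map (fun x => (x - dasom + 1).toNat)).sum + 1) dasom others 0

-- ===== PRECONDITION & SPEC =====
-- Pre_ excludes exactly the inputs on which A raises IndexError (N ≠ 1 with fewer than two
-- candidates: cands[0] or the empty heap's heap[0]).
def Pre_solution (N : Int) (cands : List Int) : Prop := N = 1 ∨ 2 ≤ cands.length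
instance (N : Int) (cands : List Int) : Decidable (Pre_solution N cands) := by unfold Pre_solution; infer_instance
def pvWitness_solution : Int × List Int := (3, [5, 7, 2])

def Spec_solution (N : Int) (cands : List Int) (out : Int) : Prop := out = solution_alt N cands
instance (N : Int) (cands : List Int) (out : Int) : Decidable (Spec_solution N cands out) := by unfold Spec_solution; infer_instance

-- ===== CLAIM (what is proved, stated in full; the proofs are below) =====
def Claim_equal_solution : Prop := ∀ (N : Int) (cands : List Int), Dom_solution N cands → Pre_solution N cands → Spec_solution N cands (solution N cands)

-- ===== LEMMAS AND PROOFS =====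

-- The surplus B computes at threshold θ: sum of x - (θ-1) over the elements ≥ θ.
-- needB (dasom + k) others is literally the sum in B's loop condition.
def needB (θ : Int) (o : List Int) : Int :=
  ((o.filter (fun x => θ ≤ x)).map (fun x => x - (θ - 1))).sum

theorem needB_cons (θ x : Int) (l : List Int) :
    needB θ (x :: l) = (if θ ≤ x then x - (θ - 1) else 0) + needB θ l := by
  by_cases h : θ ≤ x <;> simp [needB, h]

theorem needB_nonneg (θ : Int) (o : List Int) : 0 ≤ needB θ o := by
  induction o with
  | nil => simp [needB]
  | cons x l ih => rw [needB_cons]; split_ifs with h <;> omega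

theorem needB_perm (θ : Int) {o o' : List Int} (h : o.Perm o') : needB θ o = needB θ o' := by
  unfold needB
  exact ((h.filter _).map _).sum_eq

theorem needB_eq_zero (θ : Int) (o : List Int) (h : ∀ x ∈ o, x < θ) : needB θ o = 0 := by
  induction o with
  | nil => simp [needB]
  | cons x l ih =>
    rw [needB_cons, ih (fun y hy => h y (List.mem_cons_of_mem _ hy))]
    have := h x (List.mem_cons_self)
    rw [if_neg (by omega)]; omega

theorem le_needB_of_mem (θ x : Int) (o : List Int) (hx : x ∈ o) (hθ : θ ≤ x) :
    x - θ + 1 ≤ needB θ o := by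
  induction o with
  | nil => cases hx
  | cons y l ih =>
    rw [needB_cons]
    rcases List.mem_cons.mp hx with h | h
    · subst h; rw [if_pos hθ]; have := needB_nonneg θ l; omega
    · have := ih h; split_ifs with hy <;> omega

-- The one-greedy-step feasibility equivalence: replacing a maximal element M ≥ d by M - 1 and
-- raising the base by 1 shifts the feasible budgets down by exactly one.
theorem step_iff (d M : Int) (o : List Int) (hM : M ∈ o) (hmax : ∀ x ∈ o, x ≤ M)
    (k : Int) (hk : 0 ≤ k) :
    needB (d + 1 + k) ((M - 1) :: o.erase M) ≤ k ↔ needB (d + 1 + k) o ≤ k + 1 := by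
  have hperm : o.Perm (M :: o.erase M) := List.perm_cons_erase hM
  rw [needB_perm _ hperm, needB_cons, needB_cons]
  by_cases h2 : d + 1 + k ≤ M
  · by_cases h1 : d + 1 + k ≤ M - 1
    · rw [if_pos h1, if_pos h2]; omega
    · rw [if_neg h1, if_pos h2]; omega
  · have herase : needB (d + 1 + k) (o.erase M) = 0 :=
      needB_eq_zero _ _ (fun x hx => by have := hmax x (List.mem_of_mem_erase hx); omega)
    rw [if_neg (by omega), if_neg h2, herase]; omega

-- Lockstep: with the same fuel, A's greedy heap loop from state (d, heap ~ -o, result) and B's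
-- counter loop from counter k0 agree, provided t more steps are feasible from (d, o) exactly
-- when budget k0 + t is feasible for B's original data.
theorem lockstep (f : Nat) : ∀ (d result k0 d0 : Int) (o heap o0 : List Int),
    heap.Perm (o.map (fun x => -x)) →
    (∀ t : Int, 0 ≤ t → (needB (d + t) o ≤ t ↔ needB (d0 + t + k0) o0 ≤ t + k0)) →
    solLoopA f d result heap = result - k0 + solLoopB f d0 o0 k0 := by
  induction f with
  | zero => intro d result k0 d0 o heap o0 _ _; simp [solLoopA, solLoopB]
  | succ f ih =>
    intro d result k0 d0 o heap o0 hperm hinv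
    have hinv0 : needB d o ≤ 0 ↔ needB (d0 + k0) o0 ≤ k0 := by
      have h := hinv 0 le_rfl
      rw [add_zero, add_zero, zero_add] at h
      exact h
    simp only [solLoopA, solLoopB]
    cases hm : PySem.List.min? heap (fun y => y) with
    | none =>
      have hheap : heap = [] := (PySem.List.min?_eq_none_iff _ _).mp hm
      subst hheap
      dsimp only
      have ho : o = [] := by
        have := hperm.nil_eq.symm; simpa using this
      have hz : needB (d0 + k0) o0 ≤ k0 := hinv0.mp (by rw [ho]; simp [needB])
      rw [show ((o0.filter (fun x => d0 + k0 ≤ x)).map (fun x => x - (d0 + k0 - 1))).sum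
          = needB (d0 + k0) o0 from rfl, if_neg (by omega)]
      omega
    | some m =>
      dsimp only
      -- M := -m is a maximal element of o
      have hmem : m ∈ heap := PySem.List.min?_mem hm
      have hmem' : m ∈ o.map (fun x => -x) := hperm.mem_iff.mp hmem
      obtain ⟨Mx, hMx, hMm⟩ := List.mem_map.mp hmem'
      have hMo : (-m) ∈ o := by rw [show -m = Mx by omega]; exact hMx
      have hmax : ∀ x ∈ o, x ≤ -m := by
        intro x hx
        have := PySem.List.min?_isMin hm (-x) (hperm.mem_iff.mpr (List.mem_map.mpr ⟨x, hx, rfl⟩))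
        omega
      rw [show ((o0.filter (fun x => d0 + k0 ≤ x)).map (fun x => x - (d0 + k0 - 1))).sum
          = needB (d0 + k0) o0 from rfl]
      by_cases hc : -m ≥ d
      · rw [if_pos hc]
        have hA0 : ¬ needB d o ≤ 0 := by
          have h1 := le_needB_of_mem d (-m) o hMo (by omega)
          omega
        have hBgt : ¬ needB (d0 + k0) o0 ≤ k0 := fun h => hA0 (hinv0.mpr h)
        rw [if_pos (by omega)]
        rw [ih (d + 1) (result + 1) (k0 + 1) d0 (((-m) - 1) :: o.erase (-m))
            ((-(-m - 1)) :: heap.erase m) o0 ?_ ?_]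
        · omega
        · -- permutation of the new heap
          have hinj : Function.Injective (fun x : Int => -x) := fun a b h => by simpa using h
          have h1 : (heap.erase m).Perm ((o.erase (-m)).map (fun x => -x)) := by
            have hp := hperm.erase m
            rw [show m = (fun x : Int => -x) (-m) by simp, ← List.map_erase hinj] at hp
            simpa using hp
          simp only [List.map_cons]
          exact h1.cons _
        · -- shifted invariant via the one-greedy-step equivalence
          intro t ht
          rw [show d0 + t + (k0 + 1) = d0 + (t + 1) + k0 by ring,
              show t + (k0 + 1) = (t + 1) + k0 by ring,
              step_iff d (-m) o hMo hmax t ht,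
              show d + 1 + t = d + (t + 1) by ring]
          exact hinv (t + 1) (by omega)
      · rw [if_neg hc]
        have hz : needB d o ≤ 0 := by
          rw [needB_eq_zero _ _ (fun x hx => by have := hmax x hx; omega)]
        have := hinv0.mp hz
        rw [if_neg (by omega)]
        omega

-- ===== VERDICT (by name: the statement is the Claim_ definition above) =====
theorem solution_spec : Claim_equal_solution := by
  intro N cands _ hpre
  unfold Spec_solution solution solution_alt
  by_cases hN : N = 1
  · simp [hN]
  · rw [if_neg (by simpa using hN)]
    rw [if_neg (by simpa using hN)]
    have hlen : 2 ≤ cands.length := hpre.resolve_left hN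
    obtain ⟨dasom, hget⟩ : ∃ d, PySem.List.pyGet? cands 0 = some d := by
      cases h : PySem.List.pyGet? cands 0 with
      | none =>
        rw [PySem.List.pyGet?_eq_none_iff] at h
        exact absurd (by constructor <;> omega : PySem.Raise.InRange cands.length 0) h
      | some d => exact ⟨d, rfl⟩
    rw [hget]
    dsimp only
    set others := PySem.List.slice cands (some 1) none with hoth
    have hperm : ((others.map (fun cand => -1 * cand))).Perm (others.map (fun x => -x)) := by
      apply List.Perm.of_eq
      apply List.map_congr_left; intro x _; ring
    have hfuel : ((others.map (fun cand => -1 * cand)).map (fun h => (-h - dasom + 1).toNat)).sum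
        = ((others.map (fun x => (x - dasom + 1).toNat)).sum) := by
      rw [List.map_map]
      congr 1
      apply List.map_congr_left; intro x _
      simp only [Function.comp]; congr 1; ring
    rw [hfuel]
    rw [lockstep ((others.map (fun x => (x - dasom + 1).toNat)).sum + 1)
      dasom 0 0 dasom others ((others.map (fun cand => -1 * cand))) others hperm
      (by intro t ht; rw [add_zero, add_zero])]
    omega
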